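-- pv_equiv track=rewrite | github.com/jareddi/domain-tracker | src/domain_tracker/tracker_mag.py | discard_false_swaps
-- ===== SOURCE A (Python) =====
-- def discard_false_swaps(swaps):
--     """
--     Removes swaps which do not actually correspond to a topological structure.
--     """
--     if len(swaps) < 3:
--         return swaps
--
--     swaps = list(swaps)
--     keep_mask = [True] * len(swaps)
--
--     # Group indices by flip type
--     type_to_indices = defaultdict(list)
--     for idx, (_, _, ftype) in enumerate(swaps):
--         type_to_indices[ftype].append(idx)
--
--     for ftype, group in type_to_indices.items():
--         if len(group) < 3:
--             continue
--
--         to_remove = set()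
--         # Use sliding window of size 3
--         for i0, i1, i2 in zip(group[:-2], group[1:-1], group[2:]):
--             x0, x1, x2 = swaps[i0][0], swaps[i1][0], swaps[i2][0]
--
--             # Distances between swap positions
--             d01 = abs(x0 - x1)
--             d12 = abs(x1 - x2)
--             d02 = abs(x0 - x2)
--
--             # Mark the closest pair for removal
--             if d01 <= d12 and d01 <= d02:
--                 to_remove.update([i0, i1])
--             elif d12 <= d01 and d12 <= d02:
--                 to_remove.update([i1, i2])
--             else:
--                 to_remove.update([i0, i2])
--
--         # Apply removal
--         for idx in to_remove:
--             keep_mask[idx] = False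
--
--     return [swap for keep, swap in zip(keep_mask, swaps) if keep]
-- ===== SOURCE B (Python) =====
-- def discard_false_swaps(swaps):
--     """
--     Removes swaps which do not actually correspond to a topological structure.
--     Single streaming pass: remember the last two (index, x) pairs per flip type;
--     each third same-type element closes a window and clears the closest pair.
--     """
--     swaps = list(swaps)
--     keep = [True] * len(swaps)
--     last_two = {}
--
--     for i, (x, _, ftype) in enumerate(swaps):
--         prev = last_two.get(ftype, [])
--         if len(prev) == 2:
--             (i0, x0), (i1, x1) = prev
--             d01 = abs(x0 - x1)
--             d12 = abs(x1 - x)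
--             d02 = abs(x0 - x)
--             if d01 <= d12 and d01 <= d02:
--                 keep[i0] = keep[i1] = False
--             elif d12 <= d01 and d12 <= d02:
--                 keep[i1] = keep[i] = False
--             else:
--                 keep[i0] = keep[i] = False
--             last_two[ftype] = [(i1, x1), (i, x)]
--         else:
--             last_two[ftype] = prev + [(i, x)]
--
--     return [swap for k, swap in zip(keep, swaps) if k]
-- ===== Notes on version B (the rewrite author's own statement) =====
-- stated objective: alternative
-- what changed: Replaces A's two-phase pipeline (build per-type index groups in a defaultdict, then slide a size-3 window over each group collecting a removal set, then apply it to the mask) with a single streaming pass that keeps only the last two (index,x) pairs per flip type and clears the keep-mask as soon as a third same-type element closes a window.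
-- crash fix: On every input with len(swaps) >= 3 Python A raises NameError because the module never imports defaultdict; B returns the intended filtered swap list there. — e.g. on discard_false_swaps([(0, 0, 0), (1, 0, 0), (5, 0, 0)]): A raises NameError, B returns [(5, 0, 0)]
import Mathlib
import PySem

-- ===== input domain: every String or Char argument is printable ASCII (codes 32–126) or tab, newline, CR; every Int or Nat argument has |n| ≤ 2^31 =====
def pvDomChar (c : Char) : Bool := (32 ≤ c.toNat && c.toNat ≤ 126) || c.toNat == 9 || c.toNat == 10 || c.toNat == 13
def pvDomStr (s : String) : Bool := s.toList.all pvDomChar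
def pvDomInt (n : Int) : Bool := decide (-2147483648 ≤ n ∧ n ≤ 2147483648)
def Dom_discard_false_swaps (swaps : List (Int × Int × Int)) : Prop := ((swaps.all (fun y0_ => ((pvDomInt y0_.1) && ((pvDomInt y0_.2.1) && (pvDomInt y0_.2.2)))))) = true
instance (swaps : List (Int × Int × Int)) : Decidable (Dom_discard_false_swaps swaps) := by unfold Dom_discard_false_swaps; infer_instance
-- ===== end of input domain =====

-- B replaces A's two-phase group-then-window pipeline by one streaming pass keeping the
-- last two (index, x) pairs per flip type (objective: alternative decomposition, same cost).

-- ===== PORT A =====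
-- type_to_indices = defaultdict(list); for idx, (_, _, ftype) in enumerate(swaps): ….append(idx)
def aBuildGroups (swaps : List (Int × Int × Int)) : PySem.Dict Int (List Int) :=
  (PySem.List.enumerate swaps).foldl
    (fun d p => d.modify p.2.2.2 [] (fun g => g ++ [p.1])) PySem.Dict.empty

-- body of A's sliding-window loop: mark the closest pair of the window for removal
def aWindowStep (swaps : List (Int × Int × Int)) (s : PySem.Set Int) (w : (Int × Int) × Int) : PySem.Set Int :=
  let x0 := (PySem.List.pyGetD swaps w.1.1 (0, 0, 0)).1
  let x1 := (PySem.List.pyGetD swaps w.1.2 (0, 0, 0)).1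
  let x2 := (PySem.List.pyGetD swaps w.2 (0, 0, 0)).1
  let d01 := |x0 - x1|
  let d12 := |x1 - x2|
  let d02 := |x0 - x2|
  if d01 ≤ d12 ∧ d01 ≤ d02 then (s.add w.1.1).add w.1.2
  else if d12 ≤ d01 ∧ d12 ≤ d02 then (s.add w.1.2).add w.2
  else (s.add w.1.1).add w.2

-- body of A's loop over type_to_indices.items(); group[:-2]/[1:-1]/[2:] are PySem slices;
-- 'for idx in to_remove' iterates a Python set, whose order cannot affect the final mask
def aGroupStep (swaps : List (Int × Int × Int)) (mask : List Bool) (pg : Int × List Int) : List Bool :=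
  if pg.2.length < 3 then mask
  else
    let wins := ((PySem.List.slice pg.2 none (some (-2))).zip
                  (PySem.List.slice pg.2 (some 1) (some (-1)))).zip
                (PySem.List.slice pg.2 (some 2) none)
    let toRemove := wins.foldl (aWindowStep swaps) PySem.Set.empty
    toRemove.foldl (fun m i => PySem.List.pySetD m i false) mask

def discard_false_swaps (swaps : List (Int × Int × Int)) : List (Int × Int × Int) :=
  if swaps.length < 3 then swaps
  else
    let keep := (aBuildGroups swaps).items.foldl (aGroupStep swaps)
                  (List.replicate swaps.length true)
    ((keep.zip swaps).filter (fun p => p.1)).map (fun p => p.2)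

-- ===== PORT B =====
-- one streaming step: a third same-type element closes a window; clear the closest pair
def bStep (st : List Bool × PySem.Dict Int (List (Int × Int)))
    (p : Int × (Int × Int × Int)) : List Bool × PySem.Dict Int (List (Int × Int)) :=
  let prev := st.2.getD p.2.2.2 []
  match prev with
  | [(i0, x0), (i1, x1)] =>
      let d01 := |x0 - x1|
      let d12 := |x1 - p.2.1|
      let d02 := |x0 - p.2.1|
      let m :=
        if d01 ≤ d12 ∧ d01 ≤ d02 then PySem.List.pySetD (PySem.List.pySetD st.1 i0 false) i1 false
        else if d12 ≤ d01 ∧ d12 ≤ d02 then PySem.List.pySetD (PySem.List.pySetD st.1 i1 false) p.1 false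
        else PySem.List.pySetD (PySem.List.pySetD st.1 i0 false) p.1 false
      (m, st.2.insert p.2.2.2 [(i1, x1), (p.1, p.2.1)])
  | _ => (st.1, st.2.insert p.2.2.2 (prev ++ [(p.1, p.2.1)]))

def discard_false_swaps_alt (swaps : List (Int × Int × Int)) : List (Int × Int × Int) :=
  let r := (PySem.List.enumerate swaps).foldl bStep
             (List.replicate swaps.length true, PySem.Dict.empty)
  ((r.1.zip swaps).filter (fun p => p.1)).map (fun p => p.2)

-- ===== PRECONDITION & SPEC =====
-- A's module never imports 'defaultdict', so Python A raises NameError on every input with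
-- len(swaps) >= 3 and returns only on shorter ones; Pre_ excludes exactly those raising inputs.
def Pre_discard_false_swaps (swaps : List (Int × Int × Int)) : Prop := swaps.length < 3
instance (swaps : List (Int × Int × Int)) : Decidable (Pre_discard_false_swaps swaps) := by unfold Pre_discard_false_swaps; infer_instance
def pvWitness_discard_false_swaps : (List (Int × Int × Int)) := [(1, 2, 3), (4, 5, 6)]

-- On every input with len(swaps) >= 3 Python A raises NameError (unimported defaultdict),
-- while B returns the intended filtered list there.
def Raises_discard_false_swaps (swaps : List (Int × Int × Int)) : Prop := 3 ≤ swaps.length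
instance (swaps : List (Int × Int × Int)) : Decidable (Raises_discard_false_swaps swaps) := by unfold Raises_discard_false_swaps; infer_instance
def pvRaiseWitness_discard_false_swaps : (List (Int × Int × Int)) := [(0, 0, 0), (1, 0, 0), (5, 0, 0)]
def pvRaiseWitnessOut_discard_false_swaps : List (Int × Int × Int) := [(5, 0, 0)]

def Spec_discard_false_swaps (swaps : List (Int × Int × Int)) (out : List (Int × Int × Int)) : Prop := out = discard_false_swaps_alt swaps
instance (swaps : List (Int × Int × Int)) (out : List (Int × Int × Int)) : Decidable (Spec_discard_false_swaps swaps out) := by unfold Spec_discard_false_swaps; infer_instance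

-- ===== CLAIM (what is proved, stated in full; the proofs are below) =====
def Claim_equal_discard_false_swaps : Prop := ∀ (swaps : List (Int × Int × Int)), Dom_discard_false_swaps swaps → Pre_discard_false_swaps swaps → Spec_discard_false_swaps swaps (discard_false_swaps swaps)
def Claim_raises_discard_false_swaps : Prop := (∀ (swaps : List (Int × Int × Int)), Dom_discard_false_swaps swaps → Raises_discard_false_swaps swaps → ¬ Pre_discard_false_swaps swaps) ∧ (Dom_discard_false_swaps (pvRaiseWitness_discard_false_swaps) ∧ Raises_discard_false_swaps (pvRaiseWitness_discard_false_swaps) ∧ discard_false_swaps_alt (pvRaiseWitness_discard_false_swaps) = pvRaiseWitnessOut_discard_false_swaps)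

-- ===== LEMMAS AND PROOFS =====
def pairs3 (a b c : Int × Int) : List Int :=
  if |a.2 - b.2| ≤ |b.2 - c.2| ∧ |a.2 - b.2| ≤ |a.2 - c.2| then [a.1, b.1]
  else if |b.2 - c.2| ≤ |a.2 - b.2| ∧ |b.2 - c.2| ≤ |a.2 - c.2| then [b.1, c.1]
  else [a.1, c.1]

def winPairs : List (Int × Int) → List Int
  | a :: b :: c :: r => pairs3 a b c ++ winPairs (b :: c :: r)
  | _ => []
  termination_by l => l.length

def tail2 {α : Type} (l : List α) : List α := l.drop (l.length - 2)

def p2t : List (Int × Int) → (Int × Int) → List Int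
  | [a, b], c => pairs3 a b c
  | _, _ => []

lemma winPairs_short (l : List (Int × Int)) (h : l.length < 3) : winPairs l = [] := by
  rcases l with _ | ⟨a, _ | ⟨b, _ | ⟨c, r⟩⟩⟩
  · simp [winPairs]
  · simp [winPairs]
  · simp [winPairs]
  · simp at h; omega

lemma length_tail2 {α : Type} (l : List α) : (tail2 l).length = min 2 l.length := by
  simp [tail2]; omega

lemma tail2_of_short {α : Type} (l : List α) (h : l.length ≤ 2) : tail2 l = l := by
  simp [tail2, Nat.sub_eq_zero_of_le h]

lemma tail2_cons {α : Type} (x : α) (l : List α) (h : 2 ≤ l.length) :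
    tail2 (x :: l) = tail2 l := by
  have e : (x :: l).length - 2 = (l.length - 2) + 1 := by simp; omega
  simp only [tail2, e, List.drop_succ_cons]

lemma tail2_append_singleton {α : Type} (l : List α) (c : α) :
    tail2 (l ++ [c]) = tail2 (tail2 l ++ [c]) := by
  by_cases h : l.length ≤ 2
  · rw [tail2_of_short l h]
  · have h2 : (tail2 l).length = 2 := by rw [length_tail2]; omega
    have lhs : tail2 (l ++ [c]) = l.drop (l.length - 1) ++ [c] := by
      show (l ++ [c]).drop ((l ++ [c]).length - 2) = _
      have e1 : (l ++ [c]).length - 2 = l.length - 1 := by simp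
      rw [e1, List.drop_append_of_le_length (by omega)]
    have rhs : tail2 (tail2 l ++ [c]) = (tail2 l).drop 1 ++ [c] := by
      show (tail2 l ++ [c]).drop ((tail2 l ++ [c]).length - 2) = _
      have e2 : (tail2 l ++ [c]).length - 2 = 1 := by simp [h2]
      rw [e2, List.drop_append_of_le_length (by omega)]
    rw [lhs, rhs]
    show _ = (l.drop (l.length - 2)).drop 1 ++ [c]
    rw [List.drop_drop]
    congr 2
    omega

lemma winPairs_snoc (l : List (Int × Int)) (c : Int × Int) :
    winPairs (l ++ [c]) = winPairs l ++ p2t (tail2 l) c := by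
  induction l using winPairs.induct with
  | case1 a b cc r ih =>
      have e : (a :: b :: cc :: r) ++ [c] = a :: b :: cc :: (r ++ [c]) := by simp
      rw [e, winPairs, winPairs]
      have e2 : b :: cc :: (r ++ [c]) = (b :: cc :: r) ++ [c] := by simp
      rw [e2, ih, tail2_cons a (b :: cc :: r) (by simp)]
      simp
  | case2 l h =>
      rcases l with _ | ⟨a, _ | ⟨b, rest⟩⟩
      · simp [winPairs, p2t, tail2]
      · simp [winPairs, p2t, tail2]
      · rcases rest with _ | ⟨x, r⟩
        · simp [winPairs, p2t, tail2, pairs3]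
        · exact absurd rfl (h a b x r)

def clr (m : List Bool) (L : List Int) : List Bool :=
  L.foldl (fun m i => PySem.List.pySetD m i false) m

lemma clr_append (m : List Bool) (L1 L2 : List Int) :
    clr m (L1 ++ L2) = clr (clr m L1) L2 := List.foldl_append

lemma set_false_getElem?_map (m : List Bool) (n k : Nat) :
    ((m.set n false)[k]?).map (fun _ => false) = (m[k]?).map (fun _ => false) := by
  rw [List.getElem?_set]
  by_cases h : n = k
  · subst h
    by_cases hl : n < m.length
    · simp [hl, List.getElem?_eq_getElem hl]
    · simp [hl, List.getElem?_eq_none (Nat.le_of_not_lt hl)]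
  · simp [h]

lemma set_false_getElem?_self (m : List Bool) (k : Nat) :
    (m.set k false)[k]? = (m[k]?).map (fun _ => false) := by
  rw [List.getElem?_set]
  by_cases hl : k < m.length
  · simp [hl, List.getElem?_eq_getElem hl]
  · simp [hl, List.getElem?_eq_none (Nat.le_of_not_lt hl)]

lemma clr_getElem? (L : List Int) : ∀ (m : List Bool), (∀ i ∈ L, 0 ≤ i) → ∀ (k : Nat),
    (clr m L)[k]? = if (k : Int) ∈ L then (m[k]?).map (fun _ => false) else m[k]? := by
  induction L with
  | nil => intro m _ k; simp [clr]
  | cons i L ih =>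
    intro m h k
    have hi : 0 ≤ i := h i (by simp)
    have step : clr m (i :: L) = clr (PySem.List.pySetD m i false) L := rfl
    rw [step, PySem.List.pySetD_of_nonneg m false hi,
        ih _ (fun j hj => h j (by simp [hj])) k]
    by_cases hkL : (k : Int) ∈ L
    · simp only [hkL, if_true, List.mem_cons, or_true, set_false_getElem?_map]
    · by_cases hki : (k : Int) = i
      · have hik : i.toNat = k := by omega
        rw [← hki] at *
        simp only [hkL, if_false, List.mem_cons, true_or, if_true, hik,
          set_false_getElem?_self]
      · have hik : i.toNat ≠ k := by omega
        simp only [hkL, if_false, List.getElem?_set, hik]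
        simp [List.mem_cons, hki, hkL]

lemma clr_ext (L L' : List Int) (m : List Bool)
    (h1 : ∀ i ∈ L, 0 ≤ i) (h2 : ∀ i ∈ L', 0 ≤ i)
    (hmem : ∀ j, j ∈ L ↔ j ∈ L') : clr m L = clr m L' := by
  apply List.ext_getElem?
  intro k
  rw [clr_getElem? L m h1 k, clr_getElem? L' m h2 k, if_congr (hmem _) rfl rfl]

lemma foldl_clr {β : Type} (l : List β) (F : β → List Int) : ∀ (m0 : List Bool),
    l.foldl (fun m x => clr m (F x)) m0 = clr m0 (l.flatMap F) := by
  induction l with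
  | nil => intro m0; simp [clr]
  | cons x l ih => intro m0; simp only [List.foldl_cons, List.flatMap_cons, clr_append, ih]

lemma zip_replicate_id (xs : List (Int × Int × Int)) :
    (((List.replicate xs.length true).zip xs).filter (fun p => p.1)).map (fun p => p.2) = xs := by
  induction xs with
  | nil => simp
  | cons x xs ih => simpa [List.replicate_succ] using ih

lemma zip_take_left {α β : Type} (A : List α) : ∀ (B : List β) (k : Nat), B.length ≤ k →
    (A.take k).zip B = A.zip B := by
  induction A with
  | nil => intro B k _; simp
  | cons a A ih =>
    intro B k h
    cases B with
    | nil => simp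
    | cons b B =>
      cases k with
      | zero => simp at h
      | succ k => simp only [List.take_succ_cons, List.zip_cons_cons, ih B k (by simpa using h)]

def occE (l : List (Int × (Int × Int × Int))) (t : Int) : List (Int × Int) :=
  (l.filter (fun p => p.2.2.2 == t)).map (fun p => (p.1, p.2.1))

def occ (swaps : List (Int × Int × Int)) (t : Int) : List (Int × Int) :=
  occE (PySem.List.enumerate swaps) t

def typesOf (swaps : List (Int × Int × Int)) : List Int :=
  PySem.List.dedup (swaps.map (fun e => e.2.2))

def clearList (swaps : List (Int × Int × Int)) : List Int :=
  (typesOf swaps).flatMap (fun t => winPairs (occ swaps t))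


def winsOf {α : Type} (g : List α) : List ((α × α) × α) :=
  (g.zip (g.drop 1)).zip (g.drop 2)

lemma winsOf_cons3 {α : Type} (a b c : α) (r : List α) :
    winsOf (a :: b :: c :: r) = ((a, b), c) :: winsOf (b :: c :: r) := by
  simp [winsOf]

lemma occE_append (l1 l2 : List (Int × (Int × Int × Int))) (t : Int) :
    occE (l1 ++ l2) t = occE l1 t ++ occE l2 t := by
  simp [occE]

lemma occ_good (swaps : List (Int × Int × Int)) (t : Int) (p : Int × Int) (hp : p ∈ occ swaps t) :
    0 ≤ p.1 ∧ (PySem.List.pyGetD swaps p.1 (0, 0, 0)).1 = p.2 := by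
  obtain ⟨q, hq, rfl⟩ := List.mem_map.1 hp
  have hq' : q ∈ PySem.List.enumerate swaps := (List.mem_filter.1 hq).1
  obtain ⟨k, hk, rfl⟩ := (PySem.List.mem_enumerate_iff swaps 0 q).1 hq'
  refine ⟨by simp, ?_⟩
  simp only [zero_add]
  rw [PySem.List.pyGetD_natCast, List.getD_eq_getElem?_getD, List.getElem?_eq_getElem hk]
  rfl

lemma occ_length_le (swaps : List (Int × Int × Int)) (t : Int) :
    (occ swaps t).length ≤ swaps.length := by
  have := List.length_filter_le (fun p => p.2.2.2 == t) (PySem.List.enumerate swaps)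
  simp only [occ, occE, List.length_map]
  calc _ ≤ (PySem.List.enumerate swaps).length := this
    _ = swaps.length := by simp [PySem.List.length_enumerate]

lemma mem_pairs3 (j : Int) (a b c : Int × Int) (hj : j ∈ pairs3 a b c) :
    j = a.1 ∨ j = b.1 ∨ j = c.1 := by
  unfold pairs3 at hj
  split_ifs at hj <;> simp at hj <;> tauto

lemma winPairs_mem_fst (l : List (Int × Int)) (j : Int) (hj : j ∈ winPairs l) :
    ∃ p ∈ l, j = p.1 := by
  induction l using winPairs.induct with
  | case1 a b c r ih =>
    rw [winPairs] at hj
    rcases List.mem_append.1 hj with h | h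
    · rcases mem_pairs3 j a b c h with h' | h' | h'
      · exact ⟨a, by simp, h'⟩
      · exact ⟨b, by simp, h'⟩
      · exact ⟨c, by simp, h'⟩
    · obtain ⟨p, hp, rfl⟩ := ih h
      exact ⟨p, by simp at hp ⊢; tauto, rfl⟩
  | case2 l h =>
    rcases l with _ | ⟨a, _ | ⟨b, rest⟩⟩
    · simp [winPairs] at hj
    · simp [winPairs] at hj
    · rcases rest with _ | ⟨x, r⟩
      · simp [winPairs] at hj
      · exact absurd rfl (h a b x r)

lemma mem_aWindowStep_empty (swaps : List (Int × Int × Int)) (j : Int) (a b c : Int × Int)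
    (ha : (PySem.List.pyGetD swaps a.1 (0, 0, 0)).1 = a.2)
    (hb : (PySem.List.pyGetD swaps b.1 (0, 0, 0)).1 = b.2)
    (hc : (PySem.List.pyGetD swaps c.1 (0, 0, 0)).1 = c.2) :
    (j ∈ aWindowStep swaps PySem.Set.empty ((a.1, b.1), c.1)) ↔ j ∈ pairs3 a b c := by
  unfold aWindowStep pairs3
  simp only [ha, hb, hc]
  split_ifs <;> simp [PySem.Set.mem_add, PySem.Set.empty] <;> tauto

lemma mem_flatMap_winsOf (swaps : List (Int × Int × Int)) (l : List (Int × Int)) (j : Int)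
    (hx : ∀ p ∈ l, (PySem.List.pyGetD swaps p.1 (0, 0, 0)).1 = p.2) :
    (j ∈ (winsOf (l.map (fun p => p.1))).flatMap (aWindowStep swaps PySem.Set.empty))
      ↔ j ∈ winPairs l := by
  induction l using winPairs.induct with
  | case1 a b c r ih =>
    simp only [List.map_cons, winsOf_cons3, List.flatMap_cons, List.mem_append, winPairs]
    rw [mem_aWindowStep_empty swaps j a b c (hx a (by simp)) (hx b (by simp)) (hx c (by simp))]
    have := ih (fun p hp => hx p (by simp at hp ⊢; tauto))
    simp only [List.map_cons] at this
    rw [this]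
  | case2 l h =>
    rcases l with _ | ⟨a, _ | ⟨b, rest⟩⟩
    · simp [winsOf, winPairs]
    · simp [winsOf, winPairs]
    · rcases rest with _ | ⟨x, r⟩
      · simp [winsOf, winPairs]
      · exact absurd rfl (h a b x r)

lemma zip_take_take {α β : Type} (A : List α) : ∀ (B : List β) (k : Nat),
    (A.take k).zip B = (A.zip B).take k := by
  induction A with
  | nil => intro B k; simp
  | cons a A ih =>
    intro B k
    cases B with
    | nil => simp
    | cons b B =>
      cases k with
      | zero => simp
      | succ k => simp [ih B k]

lemma zip_take_right {α β : Type} (A : List α) : ∀ (B : List β) (k : Nat), A.length ≤ k →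
    A.zip (B.take k) = A.zip B := by
  induction A with
  | nil => intro B k _; simp
  | cons a A ih =>
    intro B k h
    cases B with
    | nil => simp
    | cons b B =>
      cases k with
      | zero => simp at h
      | succ k => simp only [List.take_succ_cons, List.zip_cons_cons, ih B k (by simpa using h)]

lemma slice_wins (g : List Int) (h : 3 ≤ g.length) :
    ((PySem.List.slice g none (some (-2))).zip
      (PySem.List.slice g (some 1) (some (-1)))).zip
      (PySem.List.slice g (some 2) none) = winsOf g := by
  have h1 : PySem.List.slice g none (some (-2)) = g.take (g.length - 2) := by
    rw [PySem.List.slice_to_neg_ofNat g 2 (by omega)]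
  have h2 : PySem.List.slice g (some 1) (some (-1)) = (g.drop 1).take (g.length - 2) := by
    simp [PySem.List.slice, PySem.List.clampIdx]
    have hg : g ≠ [] := by intro e; rw [e] at h; simp at h
    rw [if_neg hg, min_eq_left (by omega)]
    have e1 : ((g.length : Int) + -1).toNat = g.length - 1 := by omega
    rw [e1]
    have e2 : g.length - 1 - 1 = g.length - 2 := by omega
    rw [e2, ← List.drop_one]
  have h3 : PySem.List.slice g (some 2) none = g.drop 2 := by
    simp [PySem.List.slice, PySem.List.clampIdx]
    rw [min_eq_left (by omega), List.take_of_length_le (by simp)]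
  rw [h1, h2, h3]
  rw [zip_take_right _ _ _ (by simp), zip_take_take, winsOf,
      zip_take_left _ _ _ (by simp)]



lemma clearList_nonneg (swaps : List (Int × Int × Int)) (j : Int) (hj : j ∈ clearList swaps) :
    0 ≤ j := by
  obtain ⟨t, _, hj⟩ := List.mem_flatMap.1 hj
  obtain ⟨p, hp, rfl⟩ := winPairs_mem_fst _ _ hj
  exact (occ_good swaps t p hp).1

lemma mem_clearList_iff (swaps : List (Int × Int × Int)) (j : Int) :
    j ∈ clearList swaps ↔ ∃ t, j ∈ winPairs (occ swaps t) := by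
  constructor
  · intro hj; obtain ⟨t, _, hj⟩ := List.mem_flatMap.1 hj; exact ⟨t, hj⟩
  · rintro ⟨t, hj⟩
    apply List.mem_flatMap.2
    refine ⟨t, ?_, hj⟩
    obtain ⟨p, hp, rfl⟩ := winPairs_mem_fst _ _ hj
    obtain ⟨q, hq, _⟩ := List.mem_map.1 hp
    have hqf := List.mem_filter.1 hq
    have ht : q.2.2.2 = t := by simpa using hqf.2
    have : q.2 ∈ swaps := by
      have h2 : q.2 ∈ (PySem.List.enumerate swaps).map (fun p => p.2) :=
        List.mem_map.2 ⟨q, hqf.1, rfl⟩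
      rwa [PySem.List.map_snd_enumerate] at h2
    unfold typesOf
    rw [PySem.List.dedup_eq_ofList, PySem.Set.mem_ofList]
    exact List.mem_map.2 ⟨q.2, this, ht⟩

lemma aBuildGroups_getD (swaps : List (Int × Int × Int)) (t : Int) :
    (aBuildGroups swaps).getD t [] = (occ swaps t).map (fun p => p.1) := by
  unfold aBuildGroups
  have e : (PySem.List.enumerate swaps).foldl
      (fun d p => d.modify p.2.2.2 [] (fun g => g ++ [p.1])) PySem.Dict.empty
      = ((PySem.List.enumerate swaps).map (fun p => (p.2.2.2, p.1))).foldl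
          (fun d q => d.modify q.1 [] (fun g => g ++ [q.2])) PySem.Dict.empty :=
    (List.foldl_map (f := fun p : Int × (Int × Int × Int) => (p.2.2.2, p.1))
      (g := fun (d : PySem.Dict Int (List Int)) (q : Int × Int) => d.modify q.1 [] (fun g => g ++ [q.2]))
      (l := PySem.List.enumerate swaps) (init := PySem.Dict.empty)).symm
  rw [e, PySem.Dict.getD_foldl_modify_append]
  simp only [PySem.Dict.getD_empty, List.nil_append, List.filter_map, occ, occE, List.map_map]
  rfl

lemma aBuildGroups_keys (swaps : List (Int × Int × Int)) :
    (aBuildGroups swaps).keys = typesOf swaps := by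
  unfold aBuildGroups
  rw [PySem.Dict.keys_foldl_modify_key (PySem.List.enumerate swaps)
      (fun p => p.2.2.2) [] (fun _ p g => g ++ [p.1]) PySem.Dict.empty]
  rw [PySem.Dict.keys_empty, PySem.Set.update_nil_left]
  have e : (PySem.List.enumerate swaps).map (fun p => p.2.2.2)
      = swaps.map (fun e => e.2.2) := by
    rw [show (fun (p : Int × (Int × Int × Int)) => p.2.2.2)
          = (fun (e : Int × Int × Int) => e.2.2) ∘ (fun p => p.2) from rfl,
        ← List.map_map, PySem.List.map_snd_enumerate]
  rw [e, typesOf, PySem.List.dedup_eq_ofList]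

lemma aBuildGroups_items (swaps : List (Int × Int × Int)) :
    (aBuildGroups swaps).items
      = (typesOf swaps).map (fun t => (t, (occ swaps t).map (fun p => p.1))) := by
  have hnd : (aBuildGroups swaps).keys.Nodup := by
    unfold aBuildGroups
    exact PySem.Dict.nodup_keys_foldl_modify_key (PySem.List.enumerate swaps)
      (fun p => p.2.2.2) [] (fun _ p g => g ++ [p.1]) PySem.Dict.empty
      (by rw [PySem.Dict.keys_empty]; exact List.nodup_nil)
  rw [PySem.Dict.items_eq_map_keys _ hnd [], aBuildGroups_keys]
  exact List.map_congr_left (fun t _ => by rw [aBuildGroups_getD])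

lemma mem_aWindowStep_s (swaps : List (Int × Int × Int)) (s : PySem.Set Int)
    (w : (Int × Int) × Int) (j : Int) :
    j ∈ aWindowStep swaps s w ↔ j ∈ s ∨ j ∈ aWindowStep swaps PySem.Set.empty w := by
  simp only [aWindowStep]
  split_ifs <;> simp [PySem.Set.mem_add, PySem.Set.empty] <;> tauto

lemma mem_aWindowFold (swaps : List (Int × Int × Int)) (wins : List ((Int × Int) × Int)) :
    ∀ (s : PySem.Set Int) (j : Int),
    j ∈ wins.foldl (aWindowStep swaps) s ↔
      j ∈ s ∨ ∃ w ∈ wins, j ∈ aWindowStep swaps PySem.Set.empty w := by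
  induction wins with
  | nil => intro s j; simp
  | cons w wins ih =>
    intro s j
    rw [List.foldl_cons, ih, mem_aWindowStep_s]
    simp only [List.mem_cons]
    constructor
    · rintro ((h | h) | ⟨w', hw', h⟩)
      · exact Or.inl h
      · exact Or.inr ⟨w, Or.inl rfl, h⟩
      · exact Or.inr ⟨w', Or.inr hw', h⟩
    · rintro (h | ⟨w', (rfl | hw'), h⟩)
      · exact Or.inl (Or.inl h)
      · exact Or.inl (Or.inr h)
      · exact Or.inr ⟨w', hw', h⟩

def Fa (swaps : List (Int × Int × Int)) (pg : Int × List Int) : List Int :=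
  if pg.2.length < 3 then []
  else (((PySem.List.slice pg.2 none (some (-2))).zip
          (PySem.List.slice pg.2 (some 1) (some (-1)))).zip
          (PySem.List.slice pg.2 (some 2) none)).foldl (aWindowStep swaps) PySem.Set.empty

lemma aGroupStep_eq (swaps : List (Int × Int × Int)) (mask : List Bool) (pg : Int × List Int) :
    aGroupStep swaps mask pg = clr mask (Fa swaps pg) := by
  unfold aGroupStep Fa
  split_ifs <;> rfl

lemma mem_Fa_iff (swaps : List (Int × Int × Int)) (t : Int) (j : Int) :
    j ∈ Fa swaps (t, (occ swaps t).map (fun p => p.1)) ↔ j ∈ winPairs (occ swaps t) := by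
  unfold Fa
  simp only [List.length_map]
  by_cases hlen : (occ swaps t).length < 3
  · rw [if_pos hlen, winPairs_short _ hlen]
  · rw [if_neg hlen,
        slice_wins _ (by simp only [List.length_map]; omega),
        mem_aWindowFold]
    simp only [PySem.Set.empty, List.not_mem_nil, false_or]
    exact Iff.trans (Iff.symm List.mem_flatMap)
      (mem_flatMap_winsOf swaps _ j (fun p hp => (occ_good swaps t p hp).2))

lemma maskA_eq (swaps : List (Int × Int × Int)) :
    (aBuildGroups swaps).items.foldl (aGroupStep swaps) (List.replicate swaps.length true)
      = clr (List.replicate swaps.length true) (clearList swaps) := by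
  have e : aGroupStep swaps = fun mask pg => clr mask (Fa swaps pg) :=
    funext fun mask => funext fun pg => aGroupStep_eq swaps mask pg
  rw [e, foldl_clr]
  have hmem : ∀ j, j ∈ (aBuildGroups swaps).items.flatMap (Fa swaps) ↔ j ∈ clearList swaps := by
    intro j
    rw [aBuildGroups_items, clearList, List.mem_flatMap, List.mem_flatMap]
    constructor
    · rintro ⟨pg, hpg, hj⟩
      obtain ⟨t, ht, rfl⟩ := List.mem_map.1 hpg
      exact ⟨t, ht, (mem_Fa_iff swaps t j).1 hj⟩
    · rintro ⟨t, ht, hj⟩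
      exact ⟨(t, (occ swaps t).map (fun p => p.1)),
        List.mem_map.2 ⟨t, ht, rfl⟩, (mem_Fa_iff swaps t j).2 hj⟩
  apply clr_ext _ _ _ (fun i hi => clearList_nonneg swaps i ((hmem i).1 hi))
    (fun i hi => clearList_nonneg swaps i hi) hmem


def goB : List (Int × (Int × Int × Int)) → PySem.Dict Int (List (Int × Int)) → List (Int × Int)
  | [], _ => []
  | p :: rest, d =>
    match d.getD p.2.2.2 [] with
    | [(i0, x0), (i1, x1)] =>
        (pairs3 (i0, x0) (i1, x1) (p.1, p.2.1)).map (fun j => (p.2.2.2, j))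
          ++ goB rest (d.insert p.2.2.2 [(i1, x1), (p.1, p.2.1)])
    | prev => goB rest (d.insert p.2.2.2 (prev ++ [(p.1, p.2.1)]))

lemma foldB_fst (l : List (Int × (Int × Int × Int))) : ∀ (m : List Bool)
    (d : PySem.Dict Int (List (Int × Int))),
    (l.foldl bStep (m, d)).1 = clr m ((goB l d).map (fun q => q.2)) := by
  induction l with
  | nil => intro m d; simp [goB, clr]
  | cons p rest ih =>
    intro m d
    rw [List.foldl_cons]
    rcases hp : d.getD p.2.2.2 [] with _ | ⟨⟨i0, x0⟩, _ | ⟨⟨i1, x1⟩, _ | ⟨c, r⟩⟩⟩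
    · have hb : bStep (m, d) p = (m, d.insert p.2.2.2 ([] ++ [(p.1, p.2.1)])) := by
        simp [bStep, hp]
      have hg : goB (p :: rest) d = goB rest (d.insert p.2.2.2 ([] ++ [(p.1, p.2.1)])) := by
        simp [goB, hp]
      rw [hb, hg, ih]
    · have hb : bStep (m, d) p = (m, d.insert p.2.2.2 ([(i0, x0)] ++ [(p.1, p.2.1)])) := by
        simp [bStep, hp]
      have hg : goB (p :: rest) d = goB rest (d.insert p.2.2.2 ([(i0, x0)] ++ [(p.1, p.2.1)])) := by
        simp [goB, hp]
      rw [hb, hg, ih]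
    · have hb : bStep (m, d) p
          = (clr m (pairs3 (i0, x0) (i1, x1) (p.1, p.2.1)),
             d.insert p.2.2.2 [(i1, x1), (p.1, p.2.1)]) := by
        simp only [bStep, hp]
        unfold pairs3 clr
        split_ifs <;> rfl
      have hg : goB (p :: rest) d
          = (pairs3 (i0, x0) (i1, x1) (p.1, p.2.1)).map (fun j => (p.2.2.2, j))
              ++ goB rest (d.insert p.2.2.2 [(i1, x1), (p.1, p.2.1)]) := by
        simp [goB, hp]
      rw [hb, hg, ih, List.map_append, clr_append, List.map_map]
      congr 1
      simp
    · have hb : bStep (m, d) p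
          = (m, d.insert p.2.2.2 (((i0, x0) :: (i1, x1) :: c :: r) ++ [(p.1, p.2.1)])) := by
        simp [bStep, hp]
      have hg : goB (p :: rest) d
          = goB rest (d.insert p.2.2.2 (((i0, x0) :: (i1, x1) :: c :: r) ++ [(p.1, p.2.1)])) := by
        simp [goB, hp]
      rw [hb, hg, ih]

lemma goB_spec (rest : List (Int × (Int × Int × Int))) :
    ∀ (d : PySem.Dict Int (List (Int × Int))) (pre : List (Int × (Int × Int × Int))),
    (∀ t, d.getD t [] = tail2 (occE pre t)) → ∀ t,
    winPairs (occE pre t) ++ ((goB rest d).filter (fun q => q.1 == t)).map (fun q => q.2)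
      = winPairs (occE (pre ++ rest) t) := by
  induction rest with
  | nil => intro d pre hinv t; simp [goB]
  | cons p rest ih =>
    intro d pre hinv t
    have hocc : occE (pre ++ [p]) p.2.2.2 = occE pre p.2.2.2 ++ [(p.1, p.2.1)] := by
      rw [occE_append]; simp [occE]
    have hocc' : ∀ t', t' ≠ p.2.2.2 → occE (pre ++ [p]) t' = occE pre t' := by
      intro t' ht'
      rw [occE_append]
      have hb : (p.2.2.2 == t') = false := beq_eq_false_iff_ne.2 (fun e => ht' e.symm)
      simp [occE, hb]
    have hassoc : pre ++ p :: rest = (pre ++ [p]) ++ rest := by simp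
    rcases hp : d.getD p.2.2.2 [] with _ | ⟨⟨i0, x0⟩, _ | ⟨⟨i1, x1⟩, _ | ⟨c, r⟩⟩⟩
    · -- no previous element of this type
      have hlen : (occE pre p.2.2.2).length = 0 := by
        have h2 := length_tail2 (occE pre p.2.2.2)
        rw [← hinv p.2.2.2, hp] at h2
        simp at h2; omega
      have hnil : occE pre p.2.2.2 = [] := List.eq_nil_of_length_eq_zero hlen
      have hinv' : ∀ t', (d.insert p.2.2.2 ([] ++ [(p.1, p.2.1)])).getD t' []
          = tail2 (occE (pre ++ [p]) t') := by
        intro t'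
        rw [PySem.Dict.getD_insert]
        by_cases ht' : t' = p.2.2.2
        · subst ht'; rw [if_pos rfl, hocc, hnil]; rfl
        · rw [if_neg ht', hinv t', hocc' t' ht']
      have hg : goB (p :: rest) d = goB rest (d.insert p.2.2.2 ([] ++ [(p.1, p.2.1)])) := by
        simp [goB, hp]
      rw [hg, hassoc, ← ih _ (pre ++ [p]) hinv' t]
      congr 1
      by_cases ht' : t = p.2.2.2
      · subst ht'; rw [hocc, hnil]; simp [winPairs]
      · rw [hocc' t ht']
    · -- one previous element
      have hlen : (occE pre p.2.2.2).length = 1 := by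
        have h2 := length_tail2 (occE pre p.2.2.2)
        rw [← hinv p.2.2.2, hp] at h2
        simp at h2; omega
      have hshort : tail2 (occE pre p.2.2.2) = occE pre p.2.2.2 :=
        tail2_of_short _ (by omega)
      have hone : occE pre p.2.2.2 = [(i0, x0)] := by rw [← hshort, ← hinv p.2.2.2, hp]
      have hinv' : ∀ t', (d.insert p.2.2.2 ([(i0, x0)] ++ [(p.1, p.2.1)])).getD t' []
          = tail2 (occE (pre ++ [p]) t') := by
        intro t'
        rw [PySem.Dict.getD_insert]
        by_cases ht' : t' = p.2.2.2
        · subst ht'; rw [if_pos rfl, hocc, hone]; rfl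
        · rw [if_neg ht', hinv t', hocc' t' ht']
      have hg : goB (p :: rest) d = goB rest (d.insert p.2.2.2 ([(i0, x0)] ++ [(p.1, p.2.1)])) := by
        simp [goB, hp]
      rw [hg, hassoc, ← ih _ (pre ++ [p]) hinv' t]
      congr 1
      by_cases ht' : t = p.2.2.2
      · subst ht'; rw [hocc, hone]; simp [winPairs]
      · rw [hocc' t ht']
    · -- two previous elements: a window closes
      have ht2 : tail2 (occE pre p.2.2.2) = [(i0, x0), (i1, x1)] := by
        rw [← hinv p.2.2.2, hp]
      have hinv' : ∀ t', (d.insert p.2.2.2 [(i1, x1), (p.1, p.2.1)]).getD t' []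
          = tail2 (occE (pre ++ [p]) t') := by
        intro t'
        rw [PySem.Dict.getD_insert]
        by_cases ht' : t' = p.2.2.2
        · subst ht'
          rw [if_pos rfl, hocc, tail2_append_singleton, ht2]
          rfl
        · rw [if_neg ht', hinv t', hocc' t' ht']
      have hg : goB (p :: rest) d
          = (pairs3 (i0, x0) (i1, x1) (p.1, p.2.1)).map (fun j => (p.2.2.2, j))
              ++ goB rest (d.insert p.2.2.2 [(i1, x1), (p.1, p.2.1)]) := by
        simp [goB, hp]
      rw [hg, hassoc, ← ih _ (pre ++ [p]) hinv' t, List.filter_append, List.map_append,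
          ← List.append_assoc]
      congr 1
      by_cases ht' : t = p.2.2.2
      · subst ht'
        rw [hocc, winPairs_snoc, ht2]
        congr 1
        simp [List.filter_map, Function.comp, p2t]
      · have hb : (p.2.2.2 == t) = false := beq_eq_false_iff_ne.2 (fun e => ht' e.symm)
        rw [hocc' t ht']
        simp [List.filter_map, Function.comp, hb]
    · -- impossible: the stored list is a tail2, length ≤ 2
      exfalso
      have h2 := length_tail2 (occE pre p.2.2.2)
      rw [← hinv p.2.2.2, hp] at h2
      simp at h2; omega

lemma goB_full (swaps : List (Int × Int × Int)) (t : Int) :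
    ((goB (PySem.List.enumerate swaps) PySem.Dict.empty).filter (fun q => q.1 == t)).map
        (fun q => q.2)
      = winPairs (occ swaps t) := by
  have h := goB_spec (PySem.List.enumerate swaps) PySem.Dict.empty []
    (fun t' => by simp [occE, tail2, PySem.Dict.getD_empty]) t
  simpa [occE, winPairs, occ] using h

lemma mem_goB_iff (swaps : List (Int × Int × Int)) (j : Int) :
    (j ∈ (goB (PySem.List.enumerate swaps) PySem.Dict.empty).map (fun q => q.2)) ↔
      ∃ t, j ∈ winPairs (occ swaps t) := by
  constructor
  · intro hj
    obtain ⟨q, hq, rfl⟩ := List.mem_map.1 hj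
    refine ⟨q.1, ?_⟩
    rw [← goB_full swaps q.1]
    exact List.mem_map.2 ⟨q, List.mem_filter.2 ⟨hq, by simp⟩, rfl⟩
  · rintro ⟨t, hj⟩
    rw [← goB_full swaps t] at hj
    obtain ⟨q, hq, rfl⟩ := List.mem_map.1 hj
    exact List.mem_map.2 ⟨q, (List.mem_filter.1 hq).1, rfl⟩

lemma maskB_eq (swaps : List (Int × Int × Int)) :
    ((PySem.List.enumerate swaps).foldl bStep
        (List.replicate swaps.length true, PySem.Dict.empty)).1
      = clr (List.replicate swaps.length true) (clearList swaps) := by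
  rw [foldB_fst]
  have hmem : ∀ j, (j ∈ (goB (PySem.List.enumerate swaps) PySem.Dict.empty).map (fun q => q.2))
      ↔ j ∈ clearList swaps := by
    intro j
    rw [mem_goB_iff, mem_clearList_iff]
  exact clr_ext _ _ _ (fun i hi => clearList_nonneg swaps i ((hmem i).1 hi))
    (fun i hi => clearList_nonneg swaps i hi) hmem

theorem a_eq_b (swaps : List (Int × Int × Int)) :
    discard_false_swaps swaps = discard_false_swaps_alt swaps := by
  have hB : discard_false_swaps_alt swaps
      = (((clr (List.replicate swaps.length true) (clearList swaps)).zip swaps).filter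
          (fun p => p.1)).map (fun p => p.2) := by
    show ((((PySem.List.enumerate swaps).foldl bStep
        (List.replicate swaps.length true, PySem.Dict.empty)).1.zip swaps).filter
          (fun p => p.1)).map (fun p => p.2) = _
    rw [maskB_eq]
  by_cases h : swaps.length < 3
  · have hcl : clearList swaps = [] := by
      apply List.eq_nil_iff_forall_not_mem.2
      intro j hj
      obtain ⟨t, hj⟩ := (mem_clearList_iff swaps j).1 hj
      have hle := occ_length_le swaps t
      rw [winPairs_short _ (by omega)] at hj
      simp at hj
    rw [discard_false_swaps, if_pos h, hB, hcl]
    exact (zip_replicate_id swaps).symm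
  · rw [discard_false_swaps, if_neg h, hB, maskA_eq]

-- ===== VERDICT (by name: the statement is the Claim_ definition above) =====
theorem discard_false_swaps_spec : Claim_equal_discard_false_swaps := by
  intro swaps _ _
  unfold Spec_discard_false_swaps
  exact a_eq_b swaps

@[simp]
theorem discard_false_swaps_raises : Claim_raises_discard_false_swaps := by
  unfold Claim_raises_discard_false_swaps
  exact ⟨fun swaps _ h => by unfold Raises_discard_false_swaps at h; unfold Pre_discard_false_swaps; omega, by decide⟩
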